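-- pv_equiv track=rewrite | github.com/gsauthof/python-eti | eti2py.py | group_members
-- ===== SOURCE A (Python) =====
-- def is_elementary(t):
--     return t is not None and t.get('counter') is None
--
-- def group_members(e, dt):
--     xs = []
--     ms = []
--     for m in e:
--         t = dt.get(m.get('type'))
--         if is_elementary(t):
--             ms.append(m)
--         else:
--             if ms:
--                 xs.append(ms)
--                 ms = []
--             xs.append([m])
--     if ms:
--         xs.append(ms)
--     return xs
-- ===== SOURCE B (Python) =====
-- def group_members(e, dt):
--     def key(m):
--         t = dt.get(m.get('type'))
--         return t is not None and t.get('counter') is None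
--     xs = []
--     i = 0
--     n = len(e)
--     while i < n:
--         k = key(e[i])
--         j = i + 1
--         while j < n and key(e[j]) == k:
--             j += 1
--         run = e[i:j]
--         if k:
--             xs.append(run)
--         else:
--             xs.extend([m] for m in run)
--         i = j
--     return xs
-- ===== Notes on version B (the rewrite author's own statement) =====
-- stated objective: alternative
-- what changed: Replaces A's accumulator-and-flush loop with a run-detection scan: an inner scan finds each maximal run of equal-key members, appending elementary runs whole and exploding non-elementary runs into singletons.
import Mathlib
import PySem

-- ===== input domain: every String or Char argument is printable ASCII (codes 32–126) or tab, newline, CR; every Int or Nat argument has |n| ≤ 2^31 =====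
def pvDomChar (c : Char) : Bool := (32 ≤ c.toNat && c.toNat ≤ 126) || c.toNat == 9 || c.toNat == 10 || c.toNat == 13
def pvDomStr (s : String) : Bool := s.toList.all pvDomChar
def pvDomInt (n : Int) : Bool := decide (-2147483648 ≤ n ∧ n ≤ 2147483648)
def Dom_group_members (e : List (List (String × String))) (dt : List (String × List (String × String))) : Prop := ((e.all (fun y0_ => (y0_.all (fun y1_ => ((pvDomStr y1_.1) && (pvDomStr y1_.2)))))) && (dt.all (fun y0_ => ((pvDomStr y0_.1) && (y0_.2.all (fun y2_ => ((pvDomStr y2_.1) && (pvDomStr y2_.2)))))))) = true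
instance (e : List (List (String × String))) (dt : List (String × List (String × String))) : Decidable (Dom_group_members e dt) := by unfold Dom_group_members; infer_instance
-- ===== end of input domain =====

-- B replaces A's accumulator-and-flush loop by a run-detection scan (find each maximal
-- equal-key run, emit it whole or as singletons); alternative decomposition, same cost.

-- ===== PORT A =====
-- is_elementary(t) applied to the optional dict t = dt.get(m.get('type'))
def isElem (t : Option (List (String × String))) : Bool :=
  match t with
  | none => false
  | some t => (PySem.Dict.get? (PySem.Dict.mk t) "counter").isNone

-- t = dt.get(m.get('type')): dt.get(None) is None when m has no 'type'
def lookupT (dt : List (String × List (String × String))) (m : List (String × String)) :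
    Option (List (String × String)) :=
  match PySem.Dict.get? (PySem.Dict.mk m) "type" with
  | none => none
  | some ty => PySem.Dict.get? (PySem.Dict.mk dt) ty

def group_members (e : List (List (String × String))) (dt : List (String × List (String × String))) : List (List (List (String × String))) :=
  let r := e.foldl
    (fun (acc : List (List (List (String × String))) × List (List (String × String))) m =>
      let t := lookupT dt m
      if isElem t then (acc.1, acc.2 ++ [m])
      else
        let xs := if acc.2.isEmpty then acc.1 else acc.1 ++ [acc.2]
        (xs ++ [[m]], []))
    ([], [])
  if r.2.isEmpty then r.1 else r.1 ++ [r.2]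

-- ===== PORT B =====
-- key(m) of Source B
def keyB (dt : List (String × List (String × String))) (m : List (String × String)) : Bool :=
  isElem (lookupT dt m)

-- the outer while loop of Source B: the inner while delimits the maximal run of equal key
def groupRuns (dt : List (String × List (String × String))) :
    List (List (String × String)) → List (List (List (String × String)))
  | [] => []
  | m :: rest =>
    let k := keyB dt m
    let run := m :: rest.takeWhile (fun x => keyB dt x == k)
    let rest' := rest.dropWhile (fun x => keyB dt x == k)
    if k then run :: groupRuns dt rest'
    else run.map (fun x => [x]) ++ groupRuns dt rest'
termination_by l => l.length
decreasing_by
  all_goals simpa using Nat.lt_succ_of_le (List.length_dropWhile_le _ _)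

def group_members_alt (e : List (List (String × String))) (dt : List (String × List (String × String))) : List (List (List (String × String))) :=
  groupRuns dt e

-- ===== PRECONDITION & SPEC =====
def Spec_group_members (e : List (List (String × String))) (dt : List (String × List (String × String))) (out : List (List (List (String × String)))) : Prop := out = group_members_alt e dt
instance (e : List (List (String × String))) (dt : List (String × List (String × String))) (out : List (List (List (String × String)))) : Decidable (Spec_group_members e dt out) := by unfold Spec_group_members; infer_instance

-- ===== CLAIM (what is proved, stated in full; the proofs are below) =====
def Claim_equal_group_members : Prop := ∀ (e : List (List (String × String))) (dt : List (String × List (String × String))), Dom_group_members e dt → Spec_group_members e dt (group_members e dt)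

-- ===== LEMMAS AND PROOFS =====

-- unfolding equation for groupRuns on a cons (it is defined by well-founded recursion)
theorem groupRuns_cons (dt : List (String × List (String × String)))
    (m : List (String × String)) (rest : List (List (String × String))) :
    groupRuns dt (m :: rest) =
      if keyB dt m then
        (m :: rest.takeWhile (fun x => keyB dt x == keyB dt m)) ::
          groupRuns dt (rest.dropWhile (fun x => keyB dt x == keyB dt m))
      else
        ((m :: rest.takeWhile (fun x => keyB dt x == keyB dt m)).map (fun x => [x])) ++
          groupRuns dt (rest.dropWhile (fun x => keyB dt x == keyB dt m)) := by
  conv_lhs => rw [groupRuns.eq_def]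

-- A's loop step and finalisation, as named functions for the proofs
def stepA (dt : List (String × List (String × String)))
    (acc : List (List (List (String × String))) × List (List (String × String)))
    (m : List (String × String)) :
    List (List (List (String × String))) × List (List (String × String)) :=
  let t := lookupT dt m
  if isElem t then (acc.1, acc.2 ++ [m])
  else
    let xs := if acc.2.isEmpty then acc.1 else acc.1 ++ [acc.2]
    (xs ++ [[m]], [])

def finishA (r : List (List (List (String × String))) × List (List (String × String))) :
    List (List (List (String × String))) :=
  if r.2.isEmpty then r.1 else r.1 ++ [r.2]

-- the intermediate state of A's loop, expressed against B's run grouping: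
-- ms is the pending elementary run, which merges with the leading elementary run of l
def bridge (dt : List (String × List (String × String)))
    (ms : List (List (String × String))) (l : List (List (String × String))) :
    List (List (List (String × String))) :=
  let g := l.takeWhile (keyB dt)
  (if (ms ++ g).isEmpty then [] else [ms ++ g]) ++ groupRuns dt (l.dropWhile (keyB dt))

theorem beq_false_fun (dt : List (String × List (String × String))) :
    (fun x => keyB dt x == false) = (fun x => !keyB dt x) := by
  funext x; cases keyB dt x <;> simp

-- splitting a non-elementary run element by element yields the same singletons
theorem singleton_split (dt : List (String × List (String × String))) :
    ∀ l : List (List (String × String)),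
      ((l.takeWhile (fun x => !keyB dt x)).map (fun x => [x]))
        ++ groupRuns dt (l.dropWhile (fun x => !keyB dt x)) = groupRuns dt l := by
  intro l
  cases l with
  | nil => simp [groupRuns]
  | cons y l =>
    by_cases hy : keyB dt y
    · simp [hy]
    · simp only [Bool.not_eq_true] at hy
      rw [List.takeWhile_cons, List.dropWhile_cons, groupRuns_cons, hy]
      simp only [Bool.not_false, if_pos, if_neg Bool.false_ne_true, beq_false_fun dt]

theorem bridge_nil (dt : List (String × List (String × String)))
    (l : List (List (String × String))) : bridge dt [] l = groupRuns dt l := by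
  cases l with
  | nil => simp [bridge, groupRuns]
  | cons m l =>
    by_cases hm : keyB dt m
    · rw [bridge, List.takeWhile_cons, List.dropWhile_cons, groupRuns_cons]
      simp [hm]
    · simp only [Bool.not_eq_true] at hm
      rw [bridge, List.takeWhile_cons, List.dropWhile_cons]
      simp [hm]

theorem bridge_true (dt : List (String × List (String × String)))
    (m : List (String × String)) (ms l : List (List (String × String)))
    (hm : keyB dt m = true) :
    bridge dt ms (m :: l) = bridge dt (ms ++ [m]) l := by
  rw [bridge, bridge, List.takeWhile_cons, List.dropWhile_cons]
  simp [hm]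

theorem bridge_false (dt : List (String × List (String × String)))
    (m : List (String × String)) (ms l : List (List (String × String)))
    (hm : keyB dt m = false) :
    bridge dt ms (m :: l) =
      (if ms.isEmpty then [] else [ms]) ++ [[m]] ++ groupRuns dt l := by
  have hs := singleton_split dt l
  rw [bridge, List.takeWhile_cons, List.dropWhile_cons, hm]
  simp only [Bool.false_eq_true, if_false, List.append_nil]
  rw [groupRuns_cons, hm]
  simp only [Bool.false_eq_true, if_false, beq_false_fun dt, List.map_cons,
    List.cons_append]
  rw [hs]
  by_cases h : ms = [] <;> simp [h]

theorem foldl_bridge (dt : List (String × List (String × String))) :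
    ∀ (l : List (List (String × String)))
      (xs : List (List (List (String × String)))) (ms : List (List (String × String))),
      finishA (l.foldl (stepA dt) (xs, ms)) = xs ++ bridge dt ms l := by
  intro l
  induction l with
  | nil =>
    intro xs ms
    rw [List.foldl_nil, finishA, bridge]
    by_cases h : ms = [] <;> simp [h, groupRuns]
  | cons m l ih =>
    intro xs ms
    by_cases hm : keyB dt m
    · have hstep : stepA dt (xs, ms) m = (xs, ms ++ [m]) := by
        simp [stepA, keyB] at hm ⊢; simp [hm]
      rw [List.foldl_cons, hstep, ih, bridge_true dt m ms l hm]
    · simp only [Bool.not_eq_true] at hm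
      have hstep : stepA dt (xs, ms) m =
          ((if ms.isEmpty then xs else xs ++ [ms]) ++ [[m]], []) := by
        simp [stepA, keyB] at hm ⊢; simp [hm]
      rw [List.foldl_cons, hstep, ih, bridge_nil, bridge_false dt m ms l hm]
      by_cases h : ms = [] <;> simp [h]

-- ===== VERDICT (by name: the statement is the Claim_ definition above) =====
theorem group_members_spec : Claim_equal_group_members := by
  intro e dt _
  show group_members e dt = group_members_alt e dt
  have h2 : group_members e dt = finishA (e.foldl (stepA dt) ([], [])) := rfl
  rw [h2, foldl_bridge dt e [] [], bridge_nil]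
  simp [group_members_alt]
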